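-- pv_equiv track=rewrite | github.com/MzMahmud/problem-solving | Project Euler/33 - Digit cancelling fractions.py | is_digit_cancelling
-- ===== SOURCE A (Python) =====
-- def cancel_ith_digit(a: int, i: int) -> int:
--     s = str(a)
--     return int(s[:i] + s[i+1:])
--
-- def gcd(a, b):
--     if b == 0:
--         return a
--     return gcd(b, a % b)
--
-- def is_digit_cancelling(a, b):
--     """
--     for a two digit numerator a and denominator b
--     """
--     s_a = str(a)
--     s_b = str(b)
--     if s_a[-1] == '0' and s_b[-1] == '0':
--         # Trivial
--         return False
--
--     g = gcd(a, b)
--     r_a = a//g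
--     r_b = b//g
--     for i in range(2):
--         for j in range(2):
--             if s_a[i] == s_b[j]:
--                 c_a = cancel_ith_digit(a, i)
--                 c_b = cancel_ith_digit(b, j)
--                 g = gcd(c_a, c_b)
--                 c_a //= g
--                 c_b //= g
--                 if r_a == c_a and r_b == c_b:
--                     return True
--
--     return False
-- ===== SOURCE B (Python) =====
-- def is_digit_cancelling(a, b):
--     """
--     for a two digit numerator a and denominator b
--     """
--     s_a = str(a)
--     s_b = str(b)
--     if s_a[-1] == '0' and s_b[-1] == '0':
--         # Trivial
--         return False
--
--     def cross_ok(i, j):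
--         if s_a[i] != s_b[j]:
--             return False
--         c_a = int(s_a[:i] + s_a[i+1:])
--         c_b = int(s_b[:j] + s_b[j+1:])
--         # a/b == c_a/c_b iff c_b is a valid denominator and cross-multiplication agrees
--         return c_b != 0 and a * c_b == b * c_a
--
--     return any(cross_ok(i, j) for i in range(2) for j in range(2))
-- ===== Notes on version B (the rewrite author's own statement) =====
-- stated objective: simpler
-- what changed: B removes the gcd computation and both fraction reductions entirely: original-vs-cancelled fraction equality is decided by integer cross-multiplication a*c_b == b*c_a (with the natural nonzero-denominator guard), and the search is a single any() over a cross_ok(i, j) predicate instead of nested loops with reduce-and-compare.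
-- outside the precondition, e.g. on is_digit_cancelling(0, 20): A returns False, B returns False; on is_digit_cancelling(-5, -72): A returns True, B returns True; on is_digit_cancelling(-5, 34): A returns False, B returns False
import Mathlib
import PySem

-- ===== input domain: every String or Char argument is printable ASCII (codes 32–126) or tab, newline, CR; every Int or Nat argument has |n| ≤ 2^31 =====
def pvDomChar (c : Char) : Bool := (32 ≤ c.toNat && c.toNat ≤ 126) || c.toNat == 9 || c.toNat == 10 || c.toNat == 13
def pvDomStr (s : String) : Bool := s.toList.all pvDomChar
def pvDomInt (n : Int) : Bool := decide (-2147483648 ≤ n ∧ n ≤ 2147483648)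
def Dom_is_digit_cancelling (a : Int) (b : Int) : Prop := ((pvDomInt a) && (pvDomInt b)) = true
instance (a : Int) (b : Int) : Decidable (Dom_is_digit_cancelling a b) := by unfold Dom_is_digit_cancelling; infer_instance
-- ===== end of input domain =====

-- B drops all gcd/reduction logic and tests fraction equality by cross-multiplication
-- (with the natural nonzero-denominator guard) over the same 2x2 digit positions (objective: simpler).


-- ===== PORT A =====
-- Python's recursive gcd(a, b) = a if b == 0 else gcd(b, a % b), with Python's floor mod;
-- ported with fuel (|b| + 1 always suffices since |a % b| < |b|, see pvGcdFuel_congr below).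
def pvGcdFuel : Nat → Int → Int → Int
  | 0, a, _ => a
  | f + 1, a, b => if b = 0 then a else pvGcdFuel f b (PySem.Int.mod a b)

def pvGcd (a : Int) (b : Int) : Int := pvGcdFuel (b.natAbs + 1) a b

-- cancel_ith_digit: int(s[:i] + s[i+1:]); int('') / int('-') raise ValueError there
-- (excluded by Pre_), totalised with .getD 0 on the unreachable none.
def pvCancelIthDigit (a : Int) (i : Int) : Int :=
  let s := PySem.Int.toChars a
  (PySem.Int.ofChars? (PySem.List.slice s none (some i) ++
      PySem.List.slice s (some (i + 1)) none)).getD 0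

def is_digit_cancelling (a : Int) (b : Int) : Bool :=
  let s_a := PySem.Int.toChars a
  let s_b := PySem.Int.toChars b
  if (PySem.List.pyGet? s_a (-1) == some '0') && (PySem.List.pyGet? s_b (-1) == some '0') then
    false
  else
    let g := pvGcd a b
    let r_a := PySem.Int.floordiv a g
    let r_b := PySem.Int.floordiv b g
    (PySem.List.pyRange 0 2 1).any (fun i =>
      (PySem.List.pyRange 0 2 1).any (fun j =>
        if PySem.List.pyGet? s_a i == PySem.List.pyGet? s_b j then
          let c_a := pvCancelIthDigit a i
          let c_b := pvCancelIthDigit b j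
          let g2 := pvGcd c_a c_b
          let c_a2 := PySem.Int.floordiv c_a g2
          let c_b2 := PySem.Int.floordiv c_b g2
          decide (r_a = c_a2 ∧ r_b = c_b2)
        else false))

-- ===== PORT B =====
-- cross_ok(i, j) of Source B: no gcd, no reduction; cross-multiplication with a
-- nonzero-denominator guard; int(slice + slice) totalised with .getD 0 as above.
def pvCrossOk (a : Int) (b : Int) (s_a : List Char) (s_b : List Char) (i : Int) (j : Int) : Bool :=
  if PySem.List.pyGet? s_a i != PySem.List.pyGet? s_b j then
    false
  else
    let c_a := (PySem.Int.ofChars? (PySem.List.slice s_a none (some i) ++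
        PySem.List.slice s_a (some (i + 1)) none)).getD 0
    let c_b := (PySem.Int.ofChars? (PySem.List.slice s_b none (some j) ++
        PySem.List.slice s_b (some (j + 1)) none)).getD 0
    decide (c_b ≠ 0) && decide (a * c_b = b * c_a)

def is_digit_cancelling_alt (a : Int) (b : Int) : Bool :=
  let s_a := PySem.Int.toChars a
  let s_b := PySem.Int.toChars b
  if (PySem.List.pyGet? s_a (-1) == some '0') && (PySem.List.pyGet? s_b (-1) == some '0') then
    false
  else
    ((PySem.List.pyRange 0 2 1).flatMap (fun i =>
        (PySem.List.pyRange 0 2 1).map (fun j => (i, j)))).any (fun p =>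
      pvCrossOk a b s_a s_b p.1 p.2)

-- ===== PRECONDITION & SPEC =====
-- Pre_ excludes the arguments of magnitude < 10 (shorter than the docstring's "two digit"
-- contract): there A raises IndexError/ValueError on s[1] / int('') / int('-'), except on a few
-- guard/no-match corners where it returns and B returns the same value (see the cited examples).
def Pre_is_digit_cancelling (a : Int) (b : Int) : Prop :=
  (a ≤ -10 ∨ 10 ≤ a) ∧ (b ≤ -10 ∨ 10 ≤ b)
instance (a : Int) (b : Int) : Decidable (Pre_is_digit_cancelling a b) := by
  unfold Pre_is_digit_cancelling; infer_instance

def pvWitness_is_digit_cancelling : Int × Int := (16, 64)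

def Spec_is_digit_cancelling (a : Int) (b : Int) (out : Bool) : Prop := out = is_digit_cancelling_alt a b
instance (a : Int) (b : Int) (out : Bool) : Decidable (Spec_is_digit_cancelling a b out) := by unfold Spec_is_digit_cancelling; infer_instance

-- ===== CLAIM (what is proved, stated in full; the proofs are below) =====
def Claim_equal_is_digit_cancelling : Prop := ∀ (a : Int) (b : Int), Dom_is_digit_cancelling a b → Pre_is_digit_cancelling a b → Spec_is_digit_cancelling a b (is_digit_cancelling a b)

-- ===== LEMMAS AND PROOFS =====

lemma pv_natAbs_mod_lt (a b : Int) (hb : b ≠ 0) : (PySem.Int.mod a b).natAbs < b.natAbs := by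
  rcases lt_or_gt_of_ne hb with h | h
  · have h1 := PySem.Int.mod_neg_bounds a h; omega
  · have h1 := PySem.Int.mod_nonneg a h
    have h2 := PySem.Int.mod_lt a h
    omega

lemma pvGcdFuel_congr : ∀ (f f' : Nat) (a b : Int), b.natAbs < f → b.natAbs < f' →
    pvGcdFuel f a b = pvGcdFuel f' a b := by
  intro f
  induction f with
  | zero => intro f' a b h; omega
  | succ n ih =>
    intro f' a b h h'
    match f', h' with
    | f'' + 1, h' =>
      simp only [pvGcdFuel]
      by_cases hb : b = 0
      · simp [hb]
      · simp only [hb, if_false]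
        have hlt := pv_natAbs_mod_lt a b hb
        exact ih f'' b (PySem.Int.mod a b) (by omega) (by omega)

lemma pvGcd_zero (a : Int) : pvGcd a 0 = a := rfl

lemma pvGcd_step (a b : Int) (hb : b ≠ 0) : pvGcd a b = pvGcd b (PySem.Int.mod a b) := by
  unfold pvGcd
  conv_lhs => rw [pvGcdFuel]
  simp only [hb, if_false]
  exact pvGcdFuel_congr _ _ _ _ (pv_natAbs_mod_lt a b hb) (by omega)

lemma pvGcd_eq_aux : ∀ (n : Nat) (a b : Int), b.natAbs ≤ n → b ≠ 0 →
    pvGcd a b = b.sign * (Int.gcd a b : Int) := by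
  intro n
  induction n with
  | zero => intro a b h hb; omega
  | succ n ih =>
    intro a b h hb
    rw [pvGcd_step a b hb]
    by_cases hr0 : PySem.Int.mod a b = 0
    · rw [hr0, pvGcd_zero]
      have hdvd : b ∣ a := (PySem.Int.mod_eq_zero_iff_dvd a b).1 hr0
      have hg : Int.gcd a b = b.natAbs := by
        rw [Int.gcd_comm]
        exact Int.gcd_eq_natAbs_left hdvd
      rw [hg, Int.sign_mul_natAbs]
    · have hlt := pv_natAbs_mod_lt a b hb
      rw [ih b (PySem.Int.mod a b) (by omega) hr0]
      have hsign : (PySem.Int.mod a b).sign = b.sign := by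
        rcases lt_or_gt_of_ne hb with h1 | h1
        · have h2 := PySem.Int.mod_neg_bounds a h1
          rw [Int.sign_eq_neg_one_of_neg (by omega), Int.sign_eq_neg_one_of_neg h1]
        · have h2 := PySem.Int.mod_nonneg a h1
          rw [Int.sign_eq_one_of_pos (by omega), Int.sign_eq_one_of_pos h1]
      have hgcd : Int.gcd b (PySem.Int.mod a b) = Int.gcd a b := by
        have hd := PySem.Int.floordiv_mul_add_mod a b
        have he : PySem.Int.mod a b = a + b * (-(PySem.Int.floordiv a b)) := by linarith
        rw [he, Int.gcd_add_mul_left_right, Int.gcd_comm]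
      rw [hsign, hgcd]

lemma pvGcd_eq (a b : Int) (hb : b ≠ 0) : pvGcd a b = b.sign * (Int.gcd a b : Int) :=
  pvGcd_eq_aux b.natAbs a b le_rfl hb

lemma pv_floordiv_mul_cancel (g k : Int) (hg : g ≠ 0) : PySem.Int.floordiv (g * k) g = k := by
  have h := PySem.Int.floordiv_mul_add_mod (g * k) g
  have hm : PySem.Int.mod (g * k) g = 0 := (PySem.Int.mod_eq_zero_iff_dvd _ _).2 ⟨k, rfl⟩
  rw [hm, add_zero] at h
  exact mul_right_cancel₀ hg (h.trans (mul_comm g k))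

lemma pv_floordiv_zero_left (g : Int) : PySem.Int.floordiv 0 g = 0 := by
  by_cases hg : g = 0
  · subst hg; decide
  · have := pv_floordiv_mul_cancel g 0 hg; simpa using this

lemma pv_floordiv_self (g : Int) (hg : g ≠ 0) : PySem.Int.floordiv g g = 1 := by
  have := pv_floordiv_mul_cancel g 1 hg; simpa using this

-- reduced-pair specification: for a ≠ 0, b ≠ 0 the Python reduction (a//g, b//g) with
-- g = pvGcd a b is the unique coprime pair with positive second component representing a/b
lemma pv_red_spec (a b : Int) (ha : a ≠ 0) (hb : b ≠ 0) :
    ∃ p q : Int, a = pvGcd a b * p ∧ b = pvGcd a b * q ∧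
      PySem.Int.floordiv a (pvGcd a b) = p ∧ PySem.Int.floordiv b (pvGcd a b) = q ∧
      0 < q ∧ p ≠ 0 ∧ Int.gcd p q = 1 := by
  have hg := pvGcd_eq a b hb
  set g := pvGcd a b with hgdef
  have hgcd_pos : 0 < Int.gcd a b := Int.gcd_pos_of_ne_zero_left b ha
  have hgabs : g.natAbs = Int.gcd a b := by
    rw [hg, Int.natAbs_mul, Int.natAbs_sign]
    simp [hb]
  have hgne : g ≠ 0 := by
    intro h0; rw [h0] at hgabs; simp at hgabs; omega
  have hdvda : g ∣ a := by
    rw [← Int.natAbs_dvd, hgabs]; exact_mod_cast Int.gcd_dvd_left a b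
  have hdvdb : g ∣ b := by
    rw [← Int.natAbs_dvd, hgabs]; exact_mod_cast Int.gcd_dvd_right a b
  obtain ⟨p, hp⟩ := hdvda
  obtain ⟨q, hq⟩ := hdvdb
  refine ⟨p, q, hp, hq, ?_, ?_, ?_, ?_, ?_⟩
  · rw [hp]; exact pv_floordiv_mul_cancel _ _ hgne
  · rw [hq]; exact pv_floordiv_mul_cancel _ _ hgne
  · rcases lt_or_gt_of_ne hb with h1 | h1
    · have hgneg : g < 0 := by
        rw [hg, Int.sign_eq_neg_one_of_neg h1]; nlinarith [hgcd_pos]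
      nlinarith [hq]
    · have hgpos : 0 < g := by
        rw [hg, Int.sign_eq_one_of_pos h1]; nlinarith [hgcd_pos]
      nlinarith [hq]
  · intro h0; rw [h0, mul_zero] at hp; exact ha hp
  · have hmul : Int.gcd a b = g.natAbs * Int.gcd p q := by
      conv_lhs => rw [hp, hq]
      exact Int.gcd_mul_left g p q
    rw [hgabs] at hmul
    nlinarith [Int.gcd_nonneg p q]

-- the heart of the equivalence: equality of the Python-reduced pairs is exactly fraction
-- equality with a nonzero cancelled denominator, i.e. B's cross-multiplication test
lemma pv_reduced_eq_iff (a b c d : Int) (ha : a ≠ 0) (hb : b ≠ 0) :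
    ((PySem.Int.floordiv a (pvGcd a b) = PySem.Int.floordiv c (pvGcd c d) ∧
      PySem.Int.floordiv b (pvGcd a b) = PySem.Int.floordiv d (pvGcd c d))
      ↔ (d ≠ 0 ∧ a * d = b * c)) := by
  obtain ⟨p, q, hp, hq, hfp, hfq, hqpos, hpne, hcop⟩ := pv_red_spec a b ha hb
  rw [hfp, hfq]
  by_cases hd : d = 0
  · subst hd
    simp only [pvGcd_zero]
    by_cases hc : c = 0
    · subst hc
      rw [pv_floordiv_zero_left]
      constructor
      · rintro ⟨h1, -⟩; exact absurd h1 hpne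
      · rintro ⟨h1, -⟩; exact absurd rfl h1
    · rw [pv_floordiv_self c hc, pv_floordiv_zero_left]
      constructor
      · rintro ⟨-, h2⟩; omega
      · rintro ⟨h1, -⟩; exact absurd rfl h1
  · by_cases hc : c = 0
    · subst hc
      have hg2 : pvGcd 0 d = d := by
        rw [pvGcd_eq 0 d hd]
        simp only [Int.gcd_zero_left]
        exact_mod_cast Int.sign_mul_natAbs d
      rw [hg2, pv_floordiv_zero_left, pv_floordiv_self d hd]
      constructor
      · rintro ⟨h1, -⟩; exact absurd h1 hpne
      · rintro ⟨-, h2⟩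
        have h0 : a * d = 0 := by simpa using h2
        rcases mul_eq_zero.1 h0 with h | h
        exacts [absurd h ha, absurd h hd]
    · obtain ⟨p', q', hp', hq', hfp', hfq', hqpos', hpne', hcop'⟩ := pv_red_spec c d hc hd
      rw [hfp', hfq']
      have hgne : pvGcd a b ≠ 0 := by
        intro h0; rw [h0, zero_mul] at hq; exact hb hq
      have hgne' : pvGcd c d ≠ 0 := by
        intro h0; rw [h0, zero_mul] at hq'; exact hd hq'
      constructor
      · rintro ⟨h1, h2⟩
        subst h1; subst h2
        refine ⟨hd, ?_⟩
        have e1 : a * d = pvGcd a b * p * (pvGcd c d * q) := by rw [← hp, ← hq']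
        have e2 : b * c = pvGcd a b * q * (pvGcd c d * p) := by rw [← hq, ← hp']
        rw [e1, e2]; ring
      · rintro ⟨-, hcross⟩
        have e1 : a * d = pvGcd a b * p * (pvGcd c d * q') := by rw [← hp, ← hq']
        have e2 : b * c = pvGcd a b * q * (pvGcd c d * p') := by rw [← hq, ← hp']
        rw [e1, e2] at hcross
        have hkey : p * q' = q * p' := by
          have h1 : pvGcd a b * pvGcd c d * (p * q') = pvGcd a b * pvGcd c d * (q * p') := by
            linear_combination hcross
          exact mul_left_cancel₀ (mul_ne_zero hgne hgne') h1
        have hq_dvd : q.natAbs ∣ q'.natAbs := by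
          have h1 : q.natAbs ∣ p.natAbs * q'.natAbs := by
            rw [← Int.natAbs_mul, hkey, Int.natAbs_mul]
            exact Dvd.intro _ rfl
          exact (Nat.coprime_comm.1 hcop).dvd_of_dvd_mul_left h1
        have hq'_dvd : q'.natAbs ∣ q.natAbs := by
          have e : p' * q = q' * p := by linear_combination - hkey
          have h1 : q'.natAbs ∣ p'.natAbs * q.natAbs := by
            rw [← Int.natAbs_mul, e, Int.natAbs_mul]
            exact Dvd.intro _ rfl
          exact (Nat.coprime_comm.1 hcop').dvd_of_dvd_mul_left h1
        have hqq' : q = q' := by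
          have := Nat.dvd_antisymm hq_dvd hq'_dvd
          omega
        subst hqq'
        have hpp' : p = p' := by
          have h1 : p * q = p' * q := by linear_combination hkey
          exact mul_right_cancel₀ (show q ≠ 0 by omega) h1
        exact ⟨hpp', rfl⟩

-- each (i, j) branch of A's loop equals B's cross_ok(i, j)
lemma pv_branch (a b : Int) (ha : a ≠ 0) (hb : b ≠ 0) (i j : Int) :
    (if PySem.List.pyGet? (PySem.Int.toChars a) i == PySem.List.pyGet? (PySem.Int.toChars b) j then
       decide (PySem.Int.floordiv a (pvGcd a b) =
           PySem.Int.floordiv (pvCancelIthDigit a i)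
             (pvGcd (pvCancelIthDigit a i) (pvCancelIthDigit b j)) ∧
         PySem.Int.floordiv b (pvGcd a b) =
           PySem.Int.floordiv (pvCancelIthDigit b j)
             (pvGcd (pvCancelIthDigit a i) (pvCancelIthDigit b j)))
     else false)
    = pvCrossOk a b (PySem.Int.toChars a) (PySem.Int.toChars b) i j := by
  unfold pvCrossOk
  by_cases hm : (PySem.List.pyGet? (PySem.Int.toChars a) i ==
      PySem.List.pyGet? (PySem.Int.toChars b) j) = true
  · simp only [hm, if_true, bne, Bool.not_true, Bool.false_eq_true, if_false]
    have hiff := pv_reduced_eq_iff a b (pvCancelIthDigit a i) (pvCancelIthDigit b j) ha hb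
    rw [decide_eq_decide.2 hiff, Bool.decide_and]
    simp only [pvCancelIthDigit]
    rfl
  · simp only [Bool.not_eq_true] at hm
    simp only [hm, Bool.false_eq_true, if_false, bne, Bool.not_false, if_true]

-- ===== VERDICT (by name: the statement is the Claim_ definition above) =====
theorem is_digit_cancelling_spec : Claim_equal_is_digit_cancelling := by
  intro a b _ hpre
  obtain ⟨hpa, hpb⟩ := hpre
  have ha : a ≠ 0 := by rcases hpa with h | h <;> omega
  have hb : b ≠ 0 := by rcases hpb with h | h <;> omega
  unfold Spec_is_digit_cancelling
  have hR : PySem.List.pyRange 0 2 1 = [0, 1] := by decide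
  simp only [is_digit_cancelling, is_digit_cancelling_alt, hR]
  by_cases hgd : ((PySem.List.pyGet? (PySem.Int.toChars a) (-1) == some '0') &&
      (PySem.List.pyGet? (PySem.Int.toChars b) (-1) == some '0')) = true
  · simp only [hgd, if_true]
  · simp only [Bool.not_eq_true] at hgd
    simp only [hgd, Bool.false_eq_true, if_false]
    simp only [List.flatMap_cons, List.map_cons, List.map_nil, List.flatMap_nil,
      List.append_nil, List.any_cons, List.any_nil, Bool.or_false]
    rw [pv_branch a b ha hb 0 0, pv_branch a b ha hb 0 1,
        pv_branch a b ha hb 1 0, pv_branch a b ha hb 1 1]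
    simp [Bool.or_assoc]
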